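-- pv_equiv track=rewrite | github.com/najongchan/leetcode | codetest.py | solution
-- ===== SOURCE A (Python) =====
-- def solution(goods, boxes):
--     answer = 0
--
--     goods.sort(reverse=True)
--     boxes.sort(reverse=True)
--
--     while goods and (goods[0] > boxes[0]):
--         del goods[0]
--
--     for good in goods:
--         if boxes:
--             box = boxes[0]
--             if box >= good:
--                 answer += 1
--                 del boxes[0]
--
--         else:
--             break
--
--     return answer
-- ===== SOURCE B (Python) =====
-- def solution(goods, boxes):
--     bs = sorted(boxes, reverse=True)
--     answer = 0
--     for g in sorted(goods, reverse=True):
--         if answer < len(bs) and bs[answer] >= g: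
--             answer += 1
--     return answer
-- ===== Notes on version B (the rewrite author's own statement) =====
-- stated objective: faster
-- what changed: Replaces A's front-of-list deletions (the while-prune and 'del boxes[0]' in the loop) by a single pass over the sorted goods with one counter that is simultaneously the answer and the index of the next candidate box; B does not mutate its arguments.
import Mathlib
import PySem

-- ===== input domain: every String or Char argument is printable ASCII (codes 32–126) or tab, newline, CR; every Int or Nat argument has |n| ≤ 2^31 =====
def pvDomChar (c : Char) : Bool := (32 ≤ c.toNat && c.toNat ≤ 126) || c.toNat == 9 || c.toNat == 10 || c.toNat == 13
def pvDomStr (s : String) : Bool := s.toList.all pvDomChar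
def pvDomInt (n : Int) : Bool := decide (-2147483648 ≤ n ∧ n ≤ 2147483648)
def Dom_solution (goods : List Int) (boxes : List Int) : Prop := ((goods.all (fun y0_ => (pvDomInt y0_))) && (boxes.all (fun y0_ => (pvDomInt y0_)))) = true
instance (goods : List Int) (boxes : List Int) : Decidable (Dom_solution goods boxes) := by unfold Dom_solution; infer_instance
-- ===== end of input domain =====

-- B replaces A's repeated front-of-list deletions by one pass over the sorted goods with a
-- single counter serving as both answer and box index (objective: faster). A sorts its two
-- argument lists in place; B does not mutate them — the equivalence proved here is about the
-- RETURN value only.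

-- ===== PORT A =====
-- 'while goods and (goods[0] > boxes[0]): del goods[0]'
def pruneA (b0 : Int) : List Int → List Int
  | [] => []
  | g :: r => if g > b0 then pruneA b0 r else g :: r

-- the for loop: state (answer, boxes); 'else: break' returns the current answer
def loopA : List Int → Int → List Int → Int
  | [], ans, _ => ans
  | g :: r, ans, boxes =>
    match boxes with
    | [] => ans
    | b :: bt => if b ≥ g then loopA r (ans + 1) bt else loopA r ans (b :: bt)

def solution (goods : List Int) (boxes : List Int) : Int :=
  let gs := PySem.List.sorted goods (fun x => x) true
  let bs := PySem.List.sorted boxes (fun x => x) true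
  -- boxes[0] in the while condition: Python raises IndexError when gs ≠ [] and bs = [];
  -- Pre_solution excludes exactly that, so the default 0 is never observed.
  loopA (pruneA (bs.getD 0 0) gs) 0 bs

-- ===== PORT B =====
def solution_alt (goods : List Int) (boxes : List Int) : Int :=
  let bs := PySem.List.sorted boxes (fun x => x) true
  -- bs[answer]: the guard 'answer < len(bs)' holds and answer ≥ 0, so getD is exact here
  (PySem.List.sorted goods (fun x => x) true).foldl
    (fun ans g => if ans < (bs.length : Int) ∧ bs.getD ans.toNat 0 ≥ g then ans + 1 else ans) 0

-- ===== PRECONDITION & SPEC =====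
-- Pre_ excludes exactly the inputs where A raises IndexError: nonempty goods with empty boxes.
def Pre_solution (goods : List Int) (boxes : List Int) : Prop := goods = [] ∨ boxes ≠ []
instance (goods : List Int) (boxes : List Int) : Decidable (Pre_solution goods boxes) := by unfold Pre_solution; infer_instance
def pvWitness_solution : List Int × List Int := ([2, 3, 5], [3, 1, 4])

def Spec_solution (goods : List Int) (boxes : List Int) (out : Int) : Prop := out = solution_alt goods boxes
instance (goods : List Int) (boxes : List Int) (out : Int) : Decidable (Spec_solution goods boxes out) := by unfold Spec_solution; infer_instance

-- ===== CLAIM (what is proved, stated in full; the proofs are below) =====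
def Claim_equal_solution : Prop := ∀ (goods : List Int) (boxes : List Int), Dom_solution goods boxes → Pre_solution goods boxes → Spec_solution goods boxes (solution goods boxes)

-- ===== LEMMAS AND PROOFS =====

-- B's loop body, over a fixed sorted box list
def fB (bs : List Int) (ans : Int) (g : Int) : Int :=
  if ans < (bs.length : Int) ∧ bs.getD ans.toNat 0 ≥ g then ans + 1 else ans

lemma foldl_fB_full (bs : List Int) : ∀ r : List Int,
    List.foldl (fB bs) (bs.length : Int) r = (bs.length : Int) := by
  intro r
  induction r with
  | nil => rfl
  | cons g r ih =>
      simp only [List.foldl_cons, fB]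
      rw [if_neg (by omega)]
      exact ih

lemma loopA_eq_foldl (bs : List Int) : ∀ (gl : List Int) (j : ℕ), j ≤ bs.length →
    loopA gl (j : Int) (bs.drop j) = List.foldl (fB bs) (j : Int) gl := by
  intro gl
  induction gl with
  | nil => intro j _; rfl
  | cons g r ih =>
      intro j hj
      by_cases hlt : j < bs.length
      · rw [List.drop_eq_getElem_cons hlt]
        simp only [loopA, List.foldl_cons]
        have hgetD : bs.getD ((j : Int)).toNat 0 = bs[j] := by
          simp [List.getD_eq_getElem?_getD, List.getElem?_eq_getElem hlt]
        by_cases hge : bs[j] ≥ g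
        · rw [if_pos hge]
          have h1 : ((j : Int)) + 1 = ((j + 1 : ℕ) : Int) := by push_cast; ring
          rw [fB, if_pos ⟨by exact_mod_cast hlt, by rw [hgetD]; exact hge⟩, h1]
          exact ih (j + 1) (by omega)
        · rw [if_neg hge]
          rw [fB, if_neg (by rw [hgetD]; intro ⟨_, h⟩; exact hge h)]
          rw [← List.drop_eq_getElem_cons hlt]
          exact ih j hj
      · have hje : j = bs.length := by omega
        have hd : bs.drop j = [] := by simp [hje]
        rw [hd]
        simp only [loopA, List.foldl_cons]
        rw [fB, if_neg (by omega)]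
        subst hje
        exact (foldl_fB_full bs r).symm
  
-- dropping the over-large goods at the front does not change B's fold (at ans = 0 the
-- condition is false for each of them, since b0 is the head)
lemma foldl_fB_prune (b0 : Int) (bt : List Int) : ∀ gl : List Int,
    List.foldl (fB (b0 :: bt)) 0 gl = List.foldl (fB (b0 :: bt)) 0 (pruneA b0 gl) := by
  intro gl
  induction gl with
  | nil => rfl
  | cons g r ih =>
      by_cases hgt : g > b0
      · simp only [pruneA, if_pos hgt, List.foldl_cons]
        rw [fB, if_neg (by simp only [List.getD]; simp; omega)]
        exact ih
      · simp [pruneA, if_neg hgt]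

-- ===== VERDICT (by name: the statement is the Claim_ definition above) =====
theorem solution_spec : Claim_equal_solution := by
  intro goods boxes _ hpre
  unfold Spec_solution solution solution_alt
  set gs := PySem.List.sorted goods (fun x => x) true with hgs
  set bs := PySem.List.sorted boxes (fun x => x) true with hbs
  show loopA (pruneA (bs.getD 0 0) gs) 0 bs = List.foldl (fB bs) 0 gs
  rcases hpre with hg | hb
  · -- goods = []: both sides are 0
    have : gs = [] := by rw [hgs, hg]; rfl
    rw [this]; rfl
  · -- boxes ≠ []: bs = b0 :: bt
    have hbne : bs ≠ [] := by
      intro h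
      apply hb
      have := PySem.List.sorted_perm (xs := boxes) (key := fun x => x) (rev := true)
      rw [← hbs, h] at this
      exact this.symm.eq_nil
    obtain ⟨b0, bt, hcons⟩ := List.exists_cons_of_ne_nil hbne
    have hkey := loopA_eq_foldl bs (pruneA (bs.getD 0 0) gs) 0 (Nat.zero_le _)
    simp only [List.drop_zero, Nat.cast_zero] at hkey
    rw [hkey, hcons]
    exact (foldl_fB_prune b0 bt gs).symm
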